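-- pv_equiv track=rewrite | github.com/ffekirnew/a2sv-competitive-programming | 0468-validate-ip-address/0468-validate-ip-address.py | _check_ipv6
-- ===== SOURCE A (Python) =====
-- def _check_ipv6(query_ip: str):
--     segments = query_ip.split(':')
--
--     if len(segments) != 8:
--         return "Neither"
--
--     for segment in segments:
--         if not 1 <= len(segment) <= 4:
--             return "Neither"
--
--         for char in segment:
--             if not ('0' <= char <= '9' or 'a' <= char <= 'f' or 'A' <= char <= 'F'):
--                 return "Neither"
--
--     return "IPv6"
-- ===== SOURCE B (Python) =====
-- def _check_ipv6(query_ip: str):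
--     seg_len = 0
--     seg_count = 1
--     for ch in query_ip:
--         if ch == ':':
--             if not 1 <= seg_len <= 4:
--                 return "Neither"
--             seg_count += 1
--             seg_len = 0
--         elif '0' <= ch <= '9' or 'a' <= ch <= 'f' or 'A' <= ch <= 'F':
--             seg_len += 1
--             if seg_len > 4:
--                 return "Neither"
--         else:
--             return "Neither"
--     if seg_count == 8 and 1 <= seg_len <= 4:
--         return "IPv6"
--     return "Neither"
-- ===== Notes on version B (the rewrite author's own statement) =====
-- stated objective: alternative
-- what changed: Replaces the split-on-colon plus nested per-segment/per-char loops with a single left-to-right scan over the characters that tracks the current segment length and a segment counter.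
import Mathlib
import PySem

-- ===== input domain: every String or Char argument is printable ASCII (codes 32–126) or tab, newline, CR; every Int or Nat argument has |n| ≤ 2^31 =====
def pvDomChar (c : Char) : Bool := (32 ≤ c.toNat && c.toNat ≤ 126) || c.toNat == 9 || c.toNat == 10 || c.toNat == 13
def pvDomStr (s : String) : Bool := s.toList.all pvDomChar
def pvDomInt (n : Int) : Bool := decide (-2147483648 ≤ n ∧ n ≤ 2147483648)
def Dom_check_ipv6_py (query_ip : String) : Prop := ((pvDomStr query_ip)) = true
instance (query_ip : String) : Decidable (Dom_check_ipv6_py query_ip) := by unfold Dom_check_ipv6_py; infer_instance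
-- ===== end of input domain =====

-- B replaces A's split-then-nested-loops validation by one single pass over the
-- characters maintaining (current segment length, segment count); same cost, different algorithm.

-- ===== PORT A =====
-- the hex-character test of A's innermost 'if' (shared textually by both Pythons)
def pvHex (c : Char) : Bool :=
  ('0' ≤ c && c ≤ '9') || ('a' ≤ c && c ≤ 'f') || ('A' ≤ c && c ≤ 'F')

-- 'for char in segment: if not (…): return "Neither"' — some r = early return
def aCharLoop : List Char → Option String
  | [] => none
  | c :: rest => if ¬ (pvHex c = true) then some "Neither" else aCharLoop rest

-- 'for segment in segments: …'
def aSegLoop : List (List Char) → Option String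
  | [] => none
  | seg :: rest =>
    if ¬ (1 ≤ seg.length ∧ seg.length ≤ 4) then some "Neither"
    else
      match aCharLoop seg with
      | some r => some r
      | none => aSegLoop rest

def check_ipv6_py (query_ip : String) : String :=
  let segments := PySem.Chars.splitOn query_ip.toList [':']
  if segments.length ≠ 8 then "Neither"
  else
    match aSegLoop segments with
    | some r => r
    | none => "IPv6"

-- ===== PORT B =====
-- the single for-loop of Source B: state (seg_len, seg_count), early return "Neither"
def bLoop : List Char → Int → Int → String
  | [], segLen, segCount =>
      if segCount = 8 ∧ 1 ≤ segLen ∧ segLen ≤ 4 then "IPv6" else "Neither"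
  | ch :: rest, segLen, segCount =>
      if ch = ':' then
        if ¬ (1 ≤ segLen ∧ segLen ≤ 4) then "Neither"
        else bLoop rest 0 (segCount + 1)
      else if pvHex ch then
        if segLen + 1 > 4 then "Neither" else bLoop rest (segLen + 1) segCount
      else "Neither"

def check_ipv6_py_alt (query_ip : String) : String :=
  bLoop query_ip.toList 0 1

-- ===== PRECONDITION & SPEC =====
def Spec_check_ipv6_py (query_ip : String) (out : String) : Prop := out = check_ipv6_py_alt query_ip
instance (query_ip : String) (out : String) : Decidable (Spec_check_ipv6_py query_ip out) := by unfold Spec_check_ipv6_py; infer_instance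

-- ===== CLAIM (what is proved, stated in full; the proofs are below) =====
def Claim_equal_check_ipv6_py : Prop := ∀ (query_ip : String), Dom_check_ipv6_py query_ip → Spec_check_ipv6_py query_ip (check_ipv6_py query_ip)

-- ===== LEMMAS AND PROOFS =====

-- proof-side structural split on ':'
def sp : List Char → List (List Char)
  | [] => [[]]
  | c :: s =>
    if c = ':' then [] :: sp s
    else
      match sp s with
      | [] => [[c]]
      | p :: ps => (c :: p) :: ps

lemma sp_ne_nil (s : List Char) : sp s ≠ [] := by
  cases s with
  | nil => simp [sp]
  | cons c s =>
    simp only [sp]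
    split
    · simp
    · split <;> simp_all

lemma sp_colon (s : List Char) : sp (':' :: s) = [] :: sp s := by simp [sp]

lemma sp_other {c : Char} (hc : c ≠ ':') {s : List Char} {p : List Char} {ps : List (List Char)}
    (hsp : sp s = p :: ps) : sp (c :: s) = (c :: p) :: ps := by simp [sp, hc, hsp]

lemma splitOn_go_eq (fuel : Nat) :
    ∀ (l cur : List Char) (acc : List (List Char)), l.length < fuel →
      PySem.Chars.splitOn.go [':'] fuel l cur acc =
        acc.reverse ++
          (match sp l with
           | [] => []
           | p :: ps => (cur.reverse ++ p) :: ps) := by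
  induction fuel with
  | zero => intro l cur acc h; omega
  | succ fuel ih =>
    intro l cur acc h
    cases l with
    | nil => simp [PySem.Chars.splitOn.go, sp]
    | cons c rest =>
      simp only [PySem.Chars.splitOn.go]
      by_cases hc : c = ':'
      · have hpre : List.isPrefixOf [':'] (c :: rest) = true := by
          simp [List.isPrefixOf, hc]
        rw [if_pos hpre]
        have := ih rest [] (cur.reverse :: acc) (by simp at h ⊢; omega)
        simp only [List.length_cons, List.drop_succ_cons, List.drop_zero, List.length_nil]
        rw [this]
        have hne := sp_ne_nil rest
        cases hsp : sp rest with
        | nil => exact absurd hsp hne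
        | cons p ps => simp [sp, hc, hsp]
      · have hpre : List.isPrefixOf [':'] (c :: rest) = false := by
          simp [List.isPrefixOf]
          exact fun h' => hc h'.symm
        rw [if_neg (by simp [hpre])]
        have := ih rest (c :: cur) acc (by simp at h ⊢; omega)
        rw [this]
        have hne := sp_ne_nil rest
        cases hsp : sp rest with
        | nil => exact absurd hsp hne
        | cons p ps => simp [sp, hc, hsp]

lemma splitOn_eq_sp (s : List Char) :
    PySem.Chars.splitOn s [':'] = sp s := by
  have := splitOn_go_eq (s.length + 1) s [] [] (by omega)
  rw [PySem.Chars.splitOn] at *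
  rw [this]
  have hne := sp_ne_nil s
  cases hsp : sp s with
  | nil => exact absurd hsp hne
  | cons p ps => simp

-- a segment is valid for A
def okSeg (p : List Char) : Bool :=
  decide (1 ≤ p.length ∧ p.length ≤ 4) && p.all pvHex

lemma aCharLoop_eq (p : List Char) :
    aCharLoop p = if p.all pvHex then none else some "Neither" := by
  induction p with
  | nil => simp [aCharLoop]
  | cons c rest ih =>
    simp only [aCharLoop, List.all_cons]
    by_cases hc : pvHex c = true <;> simp [hc, ih]

lemma aSegLoop_eq (segs : List (List Char)) :
    aSegLoop segs = if segs.all okSeg then none else some "Neither" := by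
  induction segs with
  | nil => simp [aSegLoop]
  | cons seg rest ih =>
    simp only [aSegLoop, List.all_cons]
    rw [aCharLoop_eq]
    by_cases h1 : 1 ≤ seg.length ∧ seg.length ≤ 4
    · by_cases h2 : seg.all pvHex = true <;>
        simp [h1, h2, ih, okSeg]
    · simp only [if_pos h1]
      rw [if_neg]
      simp only [Bool.and_eq_true, okSeg, Bool.and_eq_true, decide_eq_true_eq]
      intro h; exact h1 h.1.1

-- the value of B's loop, expressed against the structural split
def spSpec (segs : List (List Char)) (segLen segCount : Int) : String :=
  match segs with
  | [] => "Neither"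
  | p :: ps =>
    if segCount + ps.length = 8 ∧ 1 ≤ segLen + p.length ∧ segLen + p.length ≤ 4
       ∧ p.all pvHex = true ∧ ps.all okSeg = true
    then "IPv6" else "Neither"

lemma spSpec_cons (p : List Char) (ps : List (List Char)) (segLen segCount : Int) :
    spSpec (p :: ps) segLen segCount =
      if segCount + ps.length = 8 ∧ 1 ≤ segLen + p.length ∧ segLen + p.length ≤ 4
         ∧ p.all pvHex = true ∧ ps.all okSeg = true
      then "IPv6" else "Neither" := rfl

lemma bLoop_eq (s : List Char) :
    ∀ (segLen segCount : Int), 0 ≤ segLen → segLen ≤ 4 →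
      bLoop s segLen segCount = spSpec (sp s) segLen segCount := by
  induction s with
  | nil =>
    intro segLen segCount h0 h4
    simp only [bLoop, sp]
    rw [spSpec_cons]
    simp only [List.length_nil, List.all_nil]
    by_cases h : segCount = 8 ∧ 1 ≤ segLen ∧ segLen ≤ 4
    · rw [if_pos h, if_pos]
      exact ⟨by push_cast; omega, by push_cast; omega, by push_cast; omega, by simp, by simp⟩
    · rw [if_neg h, if_neg]
      intro hcon
      obtain ⟨ha, hb, hc, _, _⟩ := hcon
      push_cast at ha hb hc
      exact h ⟨by omega, by omega, by omega⟩
  | cons c rest ih =>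
    intro segLen segCount h0 h4
    obtain ⟨q, qs, hsp⟩ : ∃ q qs, sp rest = q :: qs := by
      cases h : sp rest with
      | nil => exact absurd h (sp_ne_nil rest)
      | cons a b => exact ⟨a, b, rfl⟩
    simp only [bLoop]
    by_cases hc : c = ':'
    · subst hc
      rw [if_pos rfl, sp_colon, spSpec_cons]
      simp only [List.length_cons, List.length_nil, List.all_nil, hsp, List.all_cons]
      by_cases h1 : 1 ≤ segLen ∧ segLen ≤ 4
      · rw [if_neg (by simpa using h1), ih 0 (segCount + 1) le_rfl (by omega), hsp, spSpec_cons]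
        by_cases h2 : segCount + 1 + (qs.length : Int) = 8 ∧ (1:Int) ≤ 0 + q.length ∧ (0:Int) + q.length ≤ 4 ∧ q.all pvHex = true ∧ qs.all okSeg = true
        · rw [if_pos h2, if_pos]
          obtain ⟨ha, hb, hc', hd, he⟩ := h2
          push_cast at ha hb hc' ⊢
          refine ⟨by omega, by omega, by omega, by simp, ?_⟩
          simp only [Bool.and_eq_true, okSeg, Bool.and_eq_true, decide_eq_true_eq]
          exact ⟨⟨⟨by omega, by omega⟩, hd⟩, he⟩
        · rw [if_neg h2, if_neg]
          intro hcon
          apply h2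
          obtain ⟨ha, hb, hc', hd, he⟩ := hcon
          simp only [Bool.and_eq_true, okSeg, Bool.and_eq_true, decide_eq_true_eq] at he
          push_cast at ha ⊢
          exact ⟨by omega, by omega, by omega, he.1.2, he.2⟩
      · rw [if_pos (by simpa using h1), if_neg]
        intro hcon
        obtain ⟨_, hb, hc', _, _⟩ := hcon
        push_cast at hb hc'
        exact h1 ⟨by omega, by omega⟩
    · rw [if_neg hc, sp_other hc hsp, spSpec_cons]
      simp only [List.length_cons, List.all_cons, Bool.and_eq_true]
      by_cases hh : pvHex c = true
      · rw [if_pos hh]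
        by_cases h5 : segLen + 1 > 4
        · rw [if_pos h5, if_neg]
          intro hcon
          have := hcon.2.2.1
          push_cast at this
          omega
        · rw [if_neg h5, ih (segLen + 1) segCount (by omega) (by omega), hsp, spSpec_cons]
          by_cases h2 : segCount + (qs.length : Int) = 8 ∧ 1 ≤ segLen + 1 + (q.length : Int) ∧ segLen + 1 + (q.length : Int) ≤ 4 ∧ q.all pvHex = true ∧ qs.all okSeg = true
          · rw [if_pos h2, if_pos]
            obtain ⟨ha, hb, hc', hd, he⟩ := h2
            exact ⟨ha, by push_cast; omega, by push_cast; omega, ⟨hh, hd⟩, he⟩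
          · rw [if_neg h2, if_neg]
            intro hcon
            obtain ⟨ha, hb, hc', hd, he⟩ := hcon
            push_cast at hb hc'
            exact h2 ⟨ha, by omega, by omega, hd.2, he⟩
      · rw [if_neg hh, if_neg]
        intro hcon
        exact hh hcon.2.2.2.1.1

-- ===== VERDICT (by name: the statement is the Claim_ definition above) =====
theorem check_ipv6_py_spec : Claim_equal_check_ipv6_py := by
  intro q _
  unfold Spec_check_ipv6_py check_ipv6_py check_ipv6_py_alt
  rw [splitOn_eq_sp, bLoop_eq q.toList 0 1 le_rfl (by omega)]
  obtain ⟨p, ps, hsp⟩ : ∃ p ps, sp q.toList = p :: ps := by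
    cases h : sp q.toList with
    | nil => exact absurd h (sp_ne_nil q.toList)
    | cons a b => exact ⟨a, b, rfl⟩
  rw [hsp, spSpec_cons]
  show (if (p :: ps).length ≠ 8 then "Neither"
        else match aSegLoop (p :: ps) with | some r => r | none => "IPv6") = _
  rw [aSegLoop_eq]
  by_cases hlen : (p :: ps).length = 8
  · rw [if_neg (by simp [hlen])]
    by_cases hall : (p :: ps).all okSeg = true
    · rw [if_pos hall, if_pos]
      simp only [List.all_cons, Bool.and_eq_true, okSeg, Bool.and_eq_true, decide_eq_true_eq] at hall
      simp only [List.length_cons] at hlen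
      refine ⟨by omega, by omega, by omega, hall.1.2, ?_⟩
      simp only [List.all_eq_true] at *
      intro x hx
      simp [okSeg]
      have := hall.2 x hx
      simp [okSeg] at this
      exact ⟨⟨this.1.1, this.1.2⟩, this.2⟩
    · rw [if_neg (by simpa using hall), if_neg]
      intro hcon
      apply hall
      simp only [List.all_cons, Bool.and_eq_true, okSeg, Bool.and_eq_true, decide_eq_true_eq]
      obtain ⟨ha, hb, hc', hd, he⟩ := hcon
      refine ⟨⟨⟨by omega, by omega⟩, hd⟩, ?_⟩
      simpa [okSeg] using he
  · rw [if_pos (by simp only [List.length_cons] at hlen ⊢; omega), if_neg]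
    intro hcon
    have := hcon.1
    simp only [List.length_cons] at hlen
    push_cast at this
    omega
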